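-- pv_equiv track=rewrite | github.com/Valentin-Guillet/AISHackingChallenges | Crypto/crypto_100.py | get_possible_key_chars
-- ===== SOURCE A (Python) =====
-- import string
--
-- KEY_BYTES = set(map(ord, string.ascii_letters + string.digits))
--
-- MSG_BYTES = set(map(ord, string.ascii_letters + " ,.:'?!()-%$;"))
--
-- def get_possible_key_chars(data, offset):
--     data = [data[i + offset] for i in range(0, len(data) - offset, 6)]
--     possibilities = []
--     for byte in KEY_BYTES:
--         for d in data:
--             if (byte ^ d) not in MSG_BYTES:
--                 break
--         else:
--             possibilities.append(byte)
--
--     return possibilities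
-- ===== SOURCE B (Python) =====
-- import string
--
-- KEY_BYTES = set(map(ord, string.ascii_letters + string.digits))
--
-- MSG_BYTES = set(map(ord, string.ascii_letters + " ,.:'?!()-%$;"))
--
-- def get_possible_key_chars(data, offset):
--     sampled = [data[j] for j in range(offset, len(data), 6)]
--     viable = set(KEY_BYTES)
--     for d in sampled:
--         viable &= {m ^ d for m in MSG_BYTES}
--     return sorted(viable)
-- ===== Notes on version B (the rewrite author's own statement) =====
-- stated objective: alternative
-- what changed: A tests each key byte independently with an inner break/else scan over the sampled data; B samples by direct range(offset, len, 6) indexing, then repeatedly intersects one shrinking candidate set with the XOR image {m ^ d} of the message alphabet for each sampled byte, and returns sorted(viable).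
import Mathlib
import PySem

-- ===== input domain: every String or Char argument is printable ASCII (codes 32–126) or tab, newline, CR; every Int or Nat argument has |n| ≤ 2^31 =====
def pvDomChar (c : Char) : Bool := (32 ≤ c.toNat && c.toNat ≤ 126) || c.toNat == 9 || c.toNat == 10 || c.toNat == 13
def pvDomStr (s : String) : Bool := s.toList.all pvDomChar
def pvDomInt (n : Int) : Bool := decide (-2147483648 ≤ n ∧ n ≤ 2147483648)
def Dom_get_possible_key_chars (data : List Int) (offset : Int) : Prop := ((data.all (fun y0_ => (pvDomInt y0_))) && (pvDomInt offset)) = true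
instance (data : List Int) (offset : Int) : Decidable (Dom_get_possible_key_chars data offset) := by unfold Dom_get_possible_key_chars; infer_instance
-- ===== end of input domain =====

-- B inverts the loop nesting: instead of A's per-key scan over the data with a break/else, it
-- intersects one shrinking candidate set with the XOR image of MSG_BYTES for each sampled byte,
-- then returns the survivors sorted (alternative decomposition, same cost class).

-- ===== PORT A =====
-- KEY_BYTES iterated as a CPython set of these small ints: ascending order (digits, upper, lower).
def pvKEY : List Int :=
  (List.range 10).map (fun n => (48 : Int) + n) ++
  (List.range 26).map (fun n => (65 : Int) + n) ++
  (List.range 26).map (fun n => (97 : Int) + n)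

-- MSG_BYTES: membership only, order irrelevant.
def pvMSG : List Int :=
  [32, 33, 36, 37, 39, 40, 41, 44, 45, 46, 58, 59, 63] ++
  (List.range 26).map (fun n => (65 : Int) + n) ++
  (List.range 26).map (fun n => (97 : Int) + n)

-- data = [data[i + offset] for i in range(0, len(data) - offset, 6)]
-- (the .getD 0 is unreachable under Pre_: every index is then in Python's legal range)
def pvSample (data : List Int) (offset : Int) : List Int :=
  (PySem.List.pyRange 0 ((data.length : Int) - offset) 6).map
    (fun i => (PySem.List.pyGet? data (i + offset)).getD 0)

-- for byte in KEY_BYTES: for d in data: break unless (byte ^ d) in MSG_BYTES; else append byte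
def get_possible_key_chars (data : List Int) (offset : Int) : List Int :=
  let d := pvSample data offset
  pvKEY.foldl
    (fun poss byte =>
      if d.all (fun x => pvMSG.contains (PySem.Int.bxor byte x)) then poss ++ [byte] else poss)
    []

-- ===== PORT B =====
-- B-side constants, built by sieving a code range (same sets as A's constants).
def pvKeysB : List Int :=
  (PySem.List.pyRange 48 123 1).filter
    (fun n => !(58 ≤ n && n ≤ 64) && !(91 ≤ n && n ≤ 96))

def pvMsgB : List Int :=
  (PySem.List.pyRange 32 123 1).filter
    (fun n => (65 ≤ n && n ≤ 90) || (97 ≤ n && n ≤ 122) ||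
      ([32, 33, 36, 37, 39, 40, 41, 44, 45, 46, 58, 59, 63] : List Int).contains n)

-- sampled = [data[j] for j in range(offset, len(data), 6)]
-- viable = KEY_BYTES; for d in sampled: viable &= {m ^ d for m in MSG_BYTES}; return sorted(viable)
def get_possible_key_chars_alt (data : List Int) (offset : Int) : List Int :=
  let sampled := (PySem.List.pyRange offset (data.length : Int) 6).map
    (fun j => (PySem.List.pyGet? data j).getD 0)
  let viable := sampled.foldl
    (fun v d => v.filter (fun k => (pvMsgB.map (fun m => PySem.Int.bxor m d)).contains k))
    pvKeysB
  PySem.List.sorted viable (fun x => x) false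

-- ===== PRECONDITION & SPEC =====
-- Excluded: offsets below -len(data), where A's data[i+offset] raises IndexError (B's data[j] raises too).
def Pre_get_possible_key_chars (data : List Int) (offset : Int) : Prop :=
  -(data.length : Int) ≤ offset
instance (data : List Int) (offset : Int) : Decidable (Pre_get_possible_key_chars data offset) := by
  unfold Pre_get_possible_key_chars; infer_instance

def pvWitness_get_possible_key_chars : List Int × Int := ([65, 10, 66], 0)

def Spec_get_possible_key_chars (data : List Int) (offset : Int) (out : List Int) : Prop := out = get_possible_key_chars_alt data offset
instance (data : List Int) (offset : Int) (out : List Int) : Decidable (Spec_get_possible_key_chars data offset out) := by unfold Spec_get_possible_key_chars; infer_instance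

-- ===== CLAIM (what is proved, stated in full; the proofs are below) =====
def Claim_equal_get_possible_key_chars : Prop := ∀ (data : List Int) (offset : Int), Dom_get_possible_key_chars data offset → Pre_get_possible_key_chars data offset → Spec_get_possible_key_chars data offset (get_possible_key_chars data offset)

-- ===== LEMMAS AND PROOFS =====

-- XOR is an involution: (m ^ d) ^ d = m (case split on the two's-complement branches).
lemma pvBxorCancel (m d : Int) : PySem.Int.bxor (PySem.Int.bxor m d) d = m := by
  unfold PySem.Int.bxor
  by_cases hm : 0 ≤ m <;> by_cases hd : 0 ≤ d
  · simp only [if_pos hm, if_pos hd]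
    have : (0:Int) ≤ ↑(m.toNat ^^^ d.toNat) := Int.natCast_nonneg _
    simp [this, Int.toNat_of_nonneg hm]
  · simp only [if_pos hm, if_neg hd]
    have h1 : ¬ (0:Int) ≤ -(↑(m.toNat ^^^ (-d - 1).toNat) : Int) - 1 := by
      have := Int.natCast_nonneg (m.toNat ^^^ (-d - 1).toNat); omega
    simp only [if_neg h1]
    have h2 : (-(-(↑(m.toNat ^^^ (-d - 1).toNat) : Int) - 1) - 1) = ↑(m.toNat ^^^ (-d - 1).toNat) := by ring
    rw [h2, Int.toNat_natCast, Nat.xor_xor_cancel_right, Int.toNat_of_nonneg hm]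
  · simp only [if_neg hm, if_pos hd]
    have h1 : ¬ (0:Int) ≤ -(↑((-m - 1).toNat ^^^ d.toNat) : Int) - 1 := by
      have := Int.natCast_nonneg ((-m - 1).toNat ^^^ d.toNat); omega
    simp only [if_neg h1]
    have h2 : (-(-(↑((-m - 1).toNat ^^^ d.toNat) : Int) - 1) - 1) = ↑((-m - 1).toNat ^^^ d.toNat) := by ring
    rw [h2, Int.toNat_natCast, Nat.xor_xor_cancel_right, Int.toNat_of_nonneg (by omega)]
    omega
  · simp only [if_neg hm, if_neg hd]
    have h1 : (0:Int) ≤ ↑((-m - 1).toNat ^^^ (-d - 1).toNat) := Int.natCast_nonneg _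
    simp only [if_pos h1, Int.toNat_natCast, Nat.xor_xor_cancel_right]
    rw [Int.toNat_of_nonneg (by omega)]
    omega

-- B's constant lists name the same codes as A's.
lemma pvMsgB_eq : pvMsgB = pvMSG := by decide
lemma pvKeysB_eq : pvKeysB = pvKEY := by decide

-- membership in the XOR image of MSG_BYTES = A's per-key test
lemma pvMemImage (k d : Int) :
    (pvMsgB.map (fun m => PySem.Int.bxor m d)).contains k = pvMSG.contains (PySem.Int.bxor k d) := by
  rw [pvMsgB_eq, Bool.eq_iff_iff]
  simp only [List.contains_iff_mem, List.mem_map]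
  constructor
  · rintro ⟨m, hm, rfl⟩; rwa [pvBxorCancel]
  · intro h; exact ⟨PySem.Int.bxor k d, h, pvBxorCancel k d⟩

-- iterated intersection-as-filter = one filter by the conjunction of the tests
lemma pvFoldlFilter (p : Int → Int → Bool) (ds init : List Int) :
    ds.foldl (fun v d => v.filter (fun k => p d k)) init
      = init.filter (fun k => ds.all (fun d => p d k)) := by
  induction ds generalizing init with
  | nil => simp
  | cons x xs ih =>
      simp only [List.foldl_cons, ih, List.filter_filter, List.all_cons]
      apply List.filter_congr
      intro k _
      simp [Bool.and_comm]

-- the two sampling lines produce the same list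
lemma pvSampleEq (data : List Int) (offset : Int) :
    (PySem.List.pyRange offset (data.length : Int) 6).map
      (fun j => (PySem.List.pyGet? data j).getD 0) = pvSample data offset := by
  unfold pvSample
  rw [PySem.List.pyRange_of_pos _ _ (by norm_num), PySem.List.pyRange_of_pos _ _ (by norm_num)]
  simp only [List.map_map]
  have hcount : (if offset < (data.length : Int) then (((data.length : Int) - offset + 6 - 1) / 6).toNat else 0)
      = (if (0:Int) < (data.length : Int) - offset then (((data.length : Int) - offset - 0 + 6 - 1) / 6).toNat else 0) := by
    split_ifs with h1 h2 h2
    · congr 2; ring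
    · omega
    · omega
    · rfl
  rw [hcount]
  apply List.map_congr_left
  intro k _
  simp only [Function.comp]
  ring_nf

theorem pvEq (data : List Int) (offset : Int) :
    get_possible_key_chars data offset = get_possible_key_chars_alt data offset := by
  simp only [get_possible_key_chars, get_possible_key_chars_alt]
  rw [pvSampleEq, pvFoldlFilter (fun d k => (pvMsgB.map (fun m => PySem.Int.bxor m d)).contains k),
    PySem.List.foldl_append_if_eq_filter, List.nil_append, pvKeysB_eq]
  have hpred :
      pvKEY.filter (fun k => (pvSample data offset).all
          (fun d => (pvMsgB.map (fun m => PySem.Int.bxor m d)).contains k))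
        = pvKEY.filter (fun byte => (pvSample data offset).all
          (fun x => pvMSG.contains (PySem.Int.bxor byte x))) := by
    apply List.filter_congr
    intro k _
    simp only [pvMemImage]
  rw [hpred]
  have hpw : (pvKEY.filter (fun byte => (pvSample data offset).all
      (fun x => pvMSG.contains (PySem.Int.bxor byte x)))).Pairwise (fun a b => a ≤ b) :=
    (List.Pairwise.filter _ (by decide : pvKEY.Pairwise (· < ·))).imp (fun h => le_of_lt h)
  exact (PySem.List.sorted_eq_self_of_pairwise _ (fun x => x) hpw).symm

-- ===== VERDICT (by name: the statement is the Claim_ definition above) =====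
theorem get_possible_key_chars_spec : Claim_equal_get_possible_key_chars := by
  intro data offset _ _
  unfold Spec_get_possible_key_chars
  exact pvEq data offset
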